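-- pv_equiv track=rewrite | github.com/Cardinalempath/SIMPLELOGIN | run.py | hash_password
-- ===== SOURCE A (Python) =====
-- def hash_password(password):
--     hashed_password = ''
--     for i in range(len(password)):
--         if i % 2 == 1:
--             hashed_password += '#'
--         else:
--             hashed_password += password[i]
--     return hashed_password
-- ===== SOURCE B (Python) =====
-- def hash_password(password):
--     return ''.join(c + '#' for c in password[::2])[:len(password)]
-- ===== Notes on version B (the rewrite author's own statement) =====
-- stated objective: faster
-- what changed: Instead of looping over every index with a parity test and growing the result by repeated string concatenation, B slices out the even-indexed characters once, joins each kept character followed by a mask character, and truncates to the original length.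
import Mathlib
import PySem

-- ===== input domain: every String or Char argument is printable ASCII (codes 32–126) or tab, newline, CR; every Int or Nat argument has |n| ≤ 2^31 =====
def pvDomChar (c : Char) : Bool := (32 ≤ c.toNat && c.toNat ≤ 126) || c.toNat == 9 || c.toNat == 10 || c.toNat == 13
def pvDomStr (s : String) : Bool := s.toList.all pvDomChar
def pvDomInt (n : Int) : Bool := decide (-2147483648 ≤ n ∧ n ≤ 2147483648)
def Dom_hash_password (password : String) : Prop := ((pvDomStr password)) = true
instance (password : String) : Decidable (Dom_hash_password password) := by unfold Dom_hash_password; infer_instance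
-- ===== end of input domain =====

-- B replaces A's per-index parity loop by slice/join/truncate (measured faster by a constant factor).

-- ===== PORT A =====
def hash_password (password : String) : String :=
  String.ofList ((PySem.List.pyRange 0 (PySem.Str.len password) 1).foldl
    (fun acc i =>
      if PySem.Int.mod i 2 = 1 then acc ++ ['#']
      else acc ++ [PySem.List.pyGetD password.toList i ' ']) [])

-- ===== PORT B =====
def hash_password_alt (password : String) : String :=
  let evens := (PySem.Chars.slice? password.toList none none 2).getD []
  String.ofList (PySem.Chars.slice (PySem.Chars.join [] (evens.map (fun c => [c, '#'])))
    none (some (PySem.Str.len password)))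

-- ===== PRECONDITION & SPEC =====
def Spec_hash_password (password : String) (out : String) : Prop := out = hash_password_alt password
instance (password : String) (out : String) : Decidable (Spec_hash_password password out) := by unfold Spec_hash_password; infer_instance

-- ===== CLAIM (what is proved, stated in full; the proofs are below) =====
def Claim_equal_hash_password : Prop := ∀ (password : String), Dom_hash_password password → Spec_hash_password password (hash_password password)

-- ===== LEMMAS AND PROOFS =====

/-- The common normal form: A's and B's output on a character list. -/
def maskChars : List Char → List Char
  | [] => []
  | [c] => [c]
  | a :: _ :: t => a :: '#' :: maskChars t

/-- Python `cs[::2]` as a two-at-a-time recursion. -/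
def everyOther : List Char → List Char
  | [] => []
  | [c] => [c]
  | a :: _ :: t => a :: everyOther t

lemma slice2 (cs : List Char) :
    PySem.List.slice? cs none none 2
      = some ((List.range ((cs.length + 1) / 2)).filterMap (fun k => cs[2 * k]?)) := by
  simp only [PySem.List.slice?, PySem.List.sliceIndices]
  norm_num
  rcases Nat.eq_zero_or_pos cs.length with h | h
  · simp [h]
  · rw [if_pos (by exact_mod_cast h)]
    congr 2
    omega

lemma filterMap_eq_everyOther : ∀ cs : List Char,
    (List.range ((cs.length + 1) / 2)).filterMap (fun k => cs[2 * k]?) = everyOther cs := by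
  intro cs
  induction cs using everyOther.induct with
  | case1 => simp [everyOther]
  | case2 c => simp [everyOther]
  | case3 a b t ih =>
    have hlen : ((a :: b :: t).length + 1) / 2 = (t.length + 1) / 2 + 1 := by
      simp; omega
    have hfun : (fun k => (a :: b :: t)[2 * (k + 1)]?) = fun k => t[2 * k]? := by
      funext k
      have h2 : 2 * (k + 1) = 2 * k + 1 + 1 := by ring
      rw [h2, List.getElem?_cons_succ, List.getElem?_cons_succ]
    rw [hlen, List.range_succ_eq_map, List.filterMap_cons, List.filterMap_map]
    simp only [Function.comp_def, hfun]
    simp [everyOther, ih]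

lemma join_nil_flatten (parts : List (List Char)) :
    PySem.Chars.join [] parts = parts.flatten := by
  induction parts with
  | nil => simp [PySem.Chars.join, List.intercalate]
  | cons p t ih =>
    cases t <;> simp_all [PySem.Chars.join, List.intercalate, List.intersperse]

lemma B_flatten_take : ∀ cs : List Char,
    (((everyOther cs).map (fun c => [c, '#'])).flatten).take cs.length = maskChars cs := by
  intro cs
  induction cs using everyOther.induct with
  | case1 => simp [everyOther, maskChars]
  | case2 c => simp [everyOther, maskChars]
  | case3 a b t ih => simp [everyOther, maskChars, ih]

lemma A_map_range : ∀ cs : List Char,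
    (List.range cs.length).map (fun k => if k % 2 = 1 then '#' else cs.getD k ' ')
      = maskChars cs := by
  intro cs
  induction cs using maskChars.induct with
  | case1 => simp [maskChars]
  | case2 c => simp [maskChars]
  | case3 a b t ih =>
    have hlen : (a :: b :: t).length = t.length + 1 + 1 := by simp
    rw [hlen, List.range_succ_eq_map, List.range_succ_eq_map]
    simp only [List.map_cons, List.map_map, Function.comp_def]
    have hfun : (fun k => if (k + 1 + 1) % 2 = 1 then '#' else (a :: b :: t).getD (k + 1 + 1) ' ')
        = fun k => if k % 2 = 1 then '#' else t.getD k ' ' := by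
      funext k
      have : (k + 1 + 1) % 2 = k % 2 := by omega
      simp [this, List.getD]
    rw [hfun, ih]
    simp [maskChars, List.getD]

lemma mask_common (cs : List Char) :
    (PySem.List.pyRange 0 (cs.length : Int) 1).foldl
      (fun acc i =>
        if PySem.Int.mod i 2 = 1 then acc ++ ['#']
        else acc ++ [PySem.List.pyGetD cs i ' ']) []
    = maskChars cs := by
  have hfun : (fun (acc : List Char) (i : Int) =>
      if PySem.Int.mod i 2 = 1 then acc ++ ['#'] else acc ++ [PySem.List.pyGetD cs i ' '])
      = fun acc i => acc ++ [if PySem.Int.mod i 2 = 1 then '#' else PySem.List.pyGetD cs i ' '] := by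
    funext acc i; split <;> rfl
  rw [hfun, PySem.List.foldl_append_singleton_eq_map, List.nil_append,
      PySem.List.pyRange_zero_natCast, List.map_map]
  rw [← A_map_range cs]
  congr 1
  funext k
  by_cases h : k % 2 = 1
  · simp [h]
    intro h2
    exact absurd h2 (by omega)
  · simp [h]
    intro h2
    exact absurd h2 (by omega)

-- ===== VERDICT (by name: the statement is the Claim_ definition above) =====
theorem hash_password_spec : Claim_equal_hash_password := by
  intro password _
  unfold Spec_hash_password hash_password hash_password_alt
  simp only [PySem.Str.len, PySem.Chars.slice?_eq_listSlice?, PySem.Chars.slice_eq_listSlice,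
    slice2, Option.getD_some, join_nil_flatten, filterMap_eq_everyOther,
    PySem.List.slice_to_natCast, mask_common]
  rw [B_flatten_take]
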